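-- pv_equiv track=rewrite | github.com/EjazEkay/ApexLegendsXpGainer | Depricated/ApexEA_PC/py/mailVariation.py | generate_email_variations
-- ===== SOURCE A (Python) =====
-- import itertools
--
-- def generate_email_variations(email):
--     local_part, domain = email.split('@')
--     indices = range(len(local_part) - 1)
--     variations = set()
--
--     for i in range(1, len(local_part)):
--         for combination in itertools.combinations(indices, i):
--             new_email = list(local_part)
--             for index in combination:
--                 new_email[index] = new_email[index] + '.'
--             variations.add(''.join(new_email) + '@' + domain)
--
--     return variations
-- ===== SOURCE B (Python) =====
-- def generate_email_variations(email):
--     local_part, domain = email.split('@')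
--     n = len(local_part)
--     variations = set()
--     # breadth-first layering: frontier holds (variant built so far, last dotted gap);
--     # layer k extends each variant with one more dot in a later gap via a single slice insert
--     frontier = [(local_part, -1)]
--     for k in range(n - 1):
--         nxt = []
--         for s, j in frontier:
--             for i in range(j + 1, n - 1):
--                 p = i + 1 + k
--                 t = s[:p] + '.' + s[p:]
--                 variations.add(t + '@' + domain)
--                 nxt.append((t, i))
--         frontier = nxt
--     return variations
-- ===== Notes on version B (the rewrite author's own statement) =====
-- stated objective: alternative
-- what changed: Replaces the size-stratified itertools.combinations enumeration (which rebuilds every variant from scratch out of a mutated character list) with a breadth-first layering that carries each already-built variant and extends it with one more dot by a single slice insertion.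
import Mathlib
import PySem

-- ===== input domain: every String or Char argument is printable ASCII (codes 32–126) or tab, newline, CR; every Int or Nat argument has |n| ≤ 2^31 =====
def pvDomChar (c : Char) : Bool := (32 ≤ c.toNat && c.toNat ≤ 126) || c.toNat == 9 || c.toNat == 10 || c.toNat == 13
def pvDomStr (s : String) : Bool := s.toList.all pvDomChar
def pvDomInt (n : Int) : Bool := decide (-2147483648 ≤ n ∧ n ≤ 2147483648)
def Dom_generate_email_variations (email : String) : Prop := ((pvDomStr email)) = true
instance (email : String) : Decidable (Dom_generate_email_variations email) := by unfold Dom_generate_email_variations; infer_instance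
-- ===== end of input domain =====

-- B replaces A's size-stratified itertools.combinations enumeration (re-rendering every
-- variant from scratch) by a breadth-first layering that extends each already-built variant
-- with one more dot via a single slice insertion; same return value (alternative algorithm).

-- ===== PORT A =====
-- new_email = list(local_part); for index in combination: new_email[index] = new_email[index] + '.'; ''.join(new_email) + '@' + domain
-- (the indices come from range(len(local_part)-1), so new_email[index] is always in range: pyGetD is exact here)
def pvRenderA (local_part domain : List Char) (combination : List Int) : String :=
  let new_email := combination.foldl
    (fun ne index => PySem.List.pySetD ne index (PySem.List.pyGetD ne index [] ++ ['.']))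
    (local_part.map (fun ch => [ch]))
  String.ofList (PySem.Chars.join [] new_email ++ '@' :: domain)

def generate_email_variations (email : String) : List String :=
  match PySem.Chars.splitOn email.toList ['@'] with
  | [local_part, domain] =>
    let indices := PySem.List.pyRange 0 (PySem.List.len local_part - 1) 1
    (PySem.List.pyRange 1 (PySem.List.len local_part) 1).foldl
      (fun variations i =>
        (PySem.List.combinations indices i.toNat).foldl
          (fun variations combination =>
            PySem.Set.add variations (pvRenderA local_part domain combination))
          variations)
      (PySem.Set.empty : PySem.Set String)
  | _ => []  -- Python raises ValueError here (tuple unpacking); excluded by Pre_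

-- ===== PORT B =====
def generate_email_variations_alt (email : String) : List String :=
  let parts := PySem.Chars.splitOn email.toList ['@']
  if parts.length = 2 then  -- 'local_part, domain = email.split('@')': Python raises ValueError otherwise (excluded by Pre_)
    let local_part := parts.headD []
    let domain := parts.tail.headD []
    let n := PySem.List.len local_part
    let final :=
      (PySem.List.pyRange 0 (n - 1) 1).foldl
        (fun (st : List (List Char × Int) × PySem.Set String) k =>
          st.1.foldl
            (fun st2 sj =>
              (PySem.List.pyRange (sj.2 + 1) (n - 1) 1).foldl
                (fun st3 i =>
                  let p := i + 1 + k
                  let t := PySem.List.slice sj.1 none (some p) ++ '.' :: PySem.List.slice sj.1 (some p) none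
                  (st3.1 ++ [(t, i)], PySem.Set.add st3.2 (String.ofList (t ++ '@' :: domain))))
                st2)
            (([] : List (List Char × Int)), st.2))
        ([(local_part, (-1 : Int))], (PySem.Set.empty : PySem.Set String))
    final.2
  else []

-- ===== PRECONDITION & SPEC =====
-- Pre_ excludes exactly the inputs where splitting email on the at-sign does not yield
-- two parts (zero or several separators): there Python's tuple unpacking raises ValueError
-- in both A and B.
def Pre_generate_email_variations (email : String) : Prop :=
  (PySem.Chars.splitOn email.toList ['@']).length = 2
instance (email : String) : Decidable (Pre_generate_email_variations email) := by
  unfold Pre_generate_email_variations; infer_instance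

def pvWitness_generate_email_variations : String := "abc@x.com"

def Spec_generate_email_variations (email : String) (out : List String) : Prop := out = generate_email_variations_alt email
instance (email : String) (out : List String) : Decidable (Spec_generate_email_variations email out) := by unfold Spec_generate_email_variations; infer_instance

-- ===== CLAIM (what is proved, stated in full; the proofs are below) =====
def Claim_equal_generate_email_variations : Prop := ∀ (email : String), Dom_generate_email_variations email → Pre_generate_email_variations email → Spec_generate_email_variations email (generate_email_variations email)

-- ===== LEMMAS AND PROOFS =====

-- the mathematical rendering both sides are proved equal to: the characters of cs
-- (whose first character carries index s), each index in c followed by a dot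
def pvDot (cs : List Char) (s : Int) (c : List Int) : List Char :=
  match cs with
  | [] => []
  | ch :: t => (if s ∈ c then [ch, '.'] else [ch]) ++ pvDot t (s + 1) c

-- the dot-position sets B's frontier holds after k layers, in B's order
def pvLayer (m : Int) : Nat → List (List Int)
  | 0 => [[]]
  | k + 1 => (pvLayer m k).flatMap
      (fun c => (PySem.List.pyRange (c.getLastD (-1) + 1) m 1).map (fun i => c ++ [i]))

def pvFr (lp : List Char) (m : Int) (k : Nat) : List (List Char × Int) :=
  (pvLayer m k).map (fun c => (pvDot lp 0 c, c.getLastD (-1)))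

def pvEmit (lp dm : List Char) (m : Int) (k : Nat) : List String :=
  (pvLayer m (k + 1)).map (fun c => String.ofList (pvDot lp 0 c ++ '@' :: dm))

-- ---- generic small lemmas ----

lemma pv_join_nil (l : List (List Char)) : PySem.Chars.join [] l = l.flatten := by
  show List.intercalate [] l = l.flatten
  have h : ∀ (t : List (List Char)), (List.intersperse ([] : List Char) t).flatten = t.flatten := by
    intro t
    induction t with
    | nil => rfl
    | cons x t ih => cases t with
      | nil => simp
      | cons y t' => simp_all [List.intersperse]
  simp [List.intercalate, h]

lemma pv_last_le (c : List Int) (hs : c.Pairwise (· < ·)) (x : Int) (hx : x ∈ c) (d : Int) :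
    x ≤ c.getLastD d := by
  induction c generalizing d with
  | nil => simp at hx
  | cons y t ih =>
    rw [List.getLastD_cons]
    rcases List.mem_cons.1 hx with rfl | hx'
    · cases t with
      | nil => simp
      | cons z t' =>
        have hmem : (z :: t').getLastD x ∈ z :: t' := by
          rw [List.getLastD_eq_getLast?]
          simp [List.getLast?_eq_some_getLast]
        exact le_of_lt (List.rel_of_pairwise_cons hs hmem)
    · exact ih (List.Pairwise.of_cons hs) hx' y

-- ---- pvDot facts ----

lemma pvDot_outside (cs : List Char) (s : Int) (c : List Int)
    (h : ∀ x ∈ c, x < s ∨ s + cs.length ≤ x) : pvDot cs s c = cs := by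
  induction cs generalizing s with
  | nil => rfl
  | cons ch t ih =>
    have hs : s ∉ c := by
      intro hx
      rcases h s hx with h1 | h2
      · omega
      · simp at h2; omega
    simp only [pvDot, if_neg hs]
    rw [ih (s+1) (by intro x hx; rcases h x hx with h1 | h2
                     · left; omega
                     · right; simp at h2 ⊢; omega)]
    simp

lemma pvDot_append (xs ys : List Char) (s : Int) (c : List Int) :
    pvDot (xs ++ ys) s c = pvDot xs s c ++ pvDot ys (s + xs.length) c := by
  induction xs generalizing s with
  | nil => simp [pvDot]
  | cons ch t ih =>
    simp only [List.cons_append, pvDot, ih (s+1), List.length_cons, List.append_assoc]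
    congr 2
    push_cast; ring_nf

lemma pvDot_congr (cs : List Char) (s : Int) (c c' : List Int)
    (h : ∀ x, s ≤ x → x < s + cs.length → (x ∈ c ↔ x ∈ c')) :
    pvDot cs s c = pvDot cs s c' := by
  induction cs generalizing s with
  | nil => rfl
  | cons ch t ih =>
    simp only [pvDot]
    have hm : (s ∈ c) ↔ (s ∈ c') := h s le_rfl (by simp)
    rw [ih (s+1) (by intro x h1 h2; exact h x (by omega) (by simp at h2 ⊢; omega))]
    by_cases hs : s ∈ c
    · rw [if_pos hs, if_pos (hm.1 hs)]
    · rw [if_neg hs, if_neg (fun hh => hs (hm.2 hh))]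

lemma pvDot_length (cs : List Char) (s : Int) (c : List Int) (hn : c.Nodup)
    (hb : ∀ x ∈ c, s ≤ x ∧ x < s + cs.length) :
    (pvDot cs s c).length = cs.length + c.length := by
  have key : ∀ (cs : List Char) (s : Int),
      (pvDot cs s c).length = cs.length + ((PySem.List.pyRange s (s + cs.length) 1).countP (· ∈ c)) := by
    intro cs
    induction cs with
    | nil =>
      intro s
      rw [show s + ((([]:List Char)).length : Int) = s by simp]
      simp [pvDot, PySem.List.pyRange_one_eq_nil le_rfl]
    | cons ch t ih =>
      intro s
      rw [PySem.List.pyRange_one_cons (by simp only [List.length_cons]; push_cast; omega)]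
      simp only [pvDot, List.countP_cons, List.length_append, List.length_cons, ih (s+1)]
      have : s + 1 + (t.length : Int) = s + (t.length + 1 : Nat) := by push_cast; ring
      rw [← this]
      by_cases hs : s ∈ c <;> simp [hs] <;> omega
  rw [key]
  congr 1
  -- countP (· ∈ c) over the range = c.length
  rw [List.countP_eq_length_filter]
  have hperm : ((PySem.List.pyRange s (s + cs.length) 1).filter (fun x => decide (x ∈ c))).Perm c := by
    apply List.perm_of_nodup_nodup_toFinset_eq
    · exact (PySem.List.nodup_pyRange_one _ _).filter _
    · exact hn
    · ext x
      simp [PySem.List.mem_pyRange_one]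
      intro hx
      exact hb x hx
  exact hperm.length_eq

-- B's slice insertion performs exactly one more dot
lemma pvDot_insert (cs : List Char) (c : List Int) (i : Int)
    (hn : c.Nodup) (hb : ∀ x ∈ c, 0 ≤ x ∧ x < i) (hi0 : 0 ≤ i) (hilt : i < cs.length) :
    pvDot cs 0 (c ++ [i]) =
      (pvDot cs 0 c).take ((i + 1 + c.length).toNat) ++ '.' :: (pvDot cs 0 c).drop ((i + 1 + c.length).toNat) := by
  set I := i.toNat with hI
  have hiI : (I : Int) = i := Int.toNat_of_nonneg hi0
  have hIlt : I < cs.length := by omega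
  have hsplit : cs = cs.take I ++ cs[I] :: cs.drop (I+1) := by
    conv_lhs => rw [← List.take_append_drop I cs]
    congr 1
    rw [List.drop_eq_getElem_cons hIlt]
  have hlenA : (cs.take I).length = I := List.length_take_of_le (le_of_lt hIlt)
  -- front piece: c ++ [i] agrees with c on [0, I)
  have hfront : pvDot (cs.take I) 0 (c ++ [i]) = pvDot (cs.take I) 0 c := by
    apply pvDot_congr
    intro x hx1 hx2
    rw [hlenA] at hx2
    simp only [List.mem_append, List.mem_singleton]
    constructor
    · rintro (h | rfl)
      · exact h
      · omega
    · exact fun h => Or.inl h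
  have hDlen : (pvDot (cs.take I) 0 c).length = I + c.length := by
    rw [pvDot_length _ _ _ hn]
    · omega
    · intro x hx
      have := hb x hx
      constructor
      · omega
      · rw [hlenA]; omega
  -- expand both sides along the split
  conv_lhs => rw [hsplit]
  conv_rhs => rw [hsplit]
  rw [show (cs[I] : Char) :: cs.drop (I+1) = [cs[I]] ++ cs.drop (I+1) from rfl]
  rw [← List.append_assoc, pvDot_append, pvDot_append, pvDot_append, pvDot_append]
  rw [hfront]
  have hidx : (0:Int) + ((cs.take I).length : Int) = i := by rw [hlenA]; omega
  rw [hidx]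
  have hiC : i ∉ c := fun hmem => absurd (hb i hmem).2 (lt_irrefl i)
  have e1 : pvDot [cs[I]] i (c ++ [i]) = [cs[I], '.'] := by
    simp [pvDot]
  have e2 : pvDot [cs[I]] i c = [cs[I]] := by
    simp [pvDot, hiC]
  rw [e1, e2]
  have hidx2 : (0:Int) + (((cs.take I ++ [cs[I]]).length) : Int) = i + (([cs[I]] : List Char).length : Int) := by
    simp only [List.length_append, List.length_singleton, hlenA]; push_cast; omega
  rw [hidx2]
  have e3 : pvDot (cs.drop (I+1)) (i + (([cs[I]] : List Char).length : Int)) (c ++ [i]) = cs.drop (I+1) := by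
    apply pvDot_outside
    intro x hx
    left
    simp only [List.length_singleton]
    simp at hx
    rcases hx with h | rfl
    · have := (hb x h).2; omega
    · omega
  have e4 : pvDot (cs.drop (I+1)) (i + (([cs[I]] : List Char).length : Int)) c = cs.drop (I+1) := by
    apply pvDot_outside
    intro x hx
    left
    simp only [List.length_singleton]
    have := (hb x hx).2; omega
  rw [e3, e4]
  -- now pure list take/drop arithmetic
  have htoNat : (i + 1 + (c.length:Int)).toNat = I + c.length + 1 := by omega
  rw [htoNat]
  have hD : I + c.length + 1 = (pvDot (cs.take I) 0 c).length + 1 := by rw [hDlen]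
  rw [hD]
  rw [List.append_assoc, List.take_append, List.drop_append]
  rw [List.take_of_length_le (l := pvDot (cs.take I) 0 c ++ [cs[I]]) (by simp),
      List.drop_of_length_le (l := pvDot (cs.take I) 0 c ++ [cs[I]]) (by simp)]
  simp

-- ---- A's per-combination rendering equals pvDot ----

lemma pv_setD_fold (c : List Int) (base : List (List Char)) (hn : c.Nodup)
    (hb : ∀ x ∈ c, 0 ≤ x ∧ x < base.length) :
    c.foldl (fun ne index => PySem.List.pySetD ne index (PySem.List.pyGetD ne index [] ++ ['.'])) base =
      (PySem.List.enumerate base 0).map (fun p => if p.1 ∈ c then p.2 ++ ['.'] else p.2) := by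
  induction c generalizing base with
  | nil =>
    simp only [List.foldl_nil, List.not_mem_nil, if_false]
    exact (PySem.List.map_snd_enumerate base 0).symm
  | cons idx c' ih =>
    have hidx := hb idx (by simp)
    have hidxN : idx.toNat < base.length := by omega
    have hIdC : idx ∉ c' := (List.nodup_cons.1 hn).1
    rw [List.foldl_cons]
    have hset : PySem.List.pySetD base idx (PySem.List.pyGetD base idx [] ++ ['.'])
        = base.set idx.toNat (base[idx.toNat] ++ ['.']) := by
      rw [PySem.List.pySetD_of_nonneg base _ hidx.1,
          PySem.List.pyGetD_eq_getElem base _ hidx.1 hidx.2]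
    rw [hset, ih _ ((List.nodup_cons.1 hn).2) (by intro x hx; have := hb x (by simp [hx]); simpa using this)]
    apply List.ext_getElem
    · simp [PySem.List.length_enumerate]
    · intro t h1 h2
      simp only [List.getElem_map]
      rw [PySem.List.getElem_enumerate, PySem.List.getElem_enumerate]
      simp only [zero_add]
      by_cases ht : t = idx.toNat
      · subst ht
        rw [List.getElem_set_self]
        have hcast : ((idx.toNat : Int)) = idx := by omega
        simp [hcast, hIdC]
      · rw [List.getElem_set_ne (fun he => ht he.symm)]
        have hne : ((t:Int)) ≠ idx := by omega
        simp only [List.mem_cons]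
        by_cases hmem : (t:Int) ∈ c' <;> simp [hmem, hne]

lemma pv_enum_flatten (lp : List Char) (s : Int) (c : List Int) :
    ((PySem.List.enumerate (lp.map (fun ch => [ch])) s).map
      (fun p => if p.1 ∈ c then p.2 ++ ['.'] else p.2)).flatten = pvDot lp s c := by
  induction lp generalizing s with
  | nil => simp [pvDot]
  | cons ch t ih =>
    simp only [List.map_cons, PySem.List.enumerate_cons, List.map_cons, List.flatten_cons, ih (s+1)]
    by_cases hs : s ∈ c <;> simp [pvDot, hs]

lemma pv_renderA_eq (lp dm : List Char) (c : List Int) (hn : c.Nodup)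
    (hb : ∀ x ∈ c, 0 ≤ x ∧ x < lp.length) :
    pvRenderA lp dm c = String.ofList (pvDot lp 0 c ++ '@' :: dm) := by
  unfold pvRenderA
  rw [pv_setD_fold c _ hn (by simpa using hb)]
  show String.ofList (PySem.Chars.join [] _ ++ '@' :: dm) = _
  rw [pv_join_nil, pv_enum_flatten]

-- ---- combinations = B's layers ----

lemma pv_comb_aux : ∀ (fuel : Nat) (m a : Int), (m - a).toNat ≤ fuel → ∀ (k : Nat),
    PySem.List.combinations (PySem.List.pyRange a m 1) (k + 1) =
      (PySem.List.combinations (PySem.List.pyRange a m 1) k).flatMap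
        (fun c => (PySem.List.pyRange (c.getLastD (a - 1) + 1) m 1).map (fun i => c ++ [i])) := by
  intro fuel
  induction fuel with
  | zero =>
    intro m a hle k
    have ham : m ≤ a := by omega
    rw [PySem.List.pyRange_one_eq_nil ham]
    cases k with
    | zero =>
      simp [PySem.List.combinations_nil_succ, PySem.List.combinations_zero,
            PySem.List.pyRange_one_eq_nil ham]
    | succ k' =>
      simp [PySem.List.combinations_nil_succ]
  | succ f ihf =>
    intro m a hle k
    by_cases ham : m ≤ a
    · rw [PySem.List.pyRange_one_eq_nil ham]
      cases k with
      | zero =>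
        simp [PySem.List.combinations_nil_succ, PySem.List.combinations_zero,
              PySem.List.pyRange_one_eq_nil ham]
      | succ k' =>
        simp [PySem.List.combinations_nil_succ]
    · have halt : a < m := by omega
      have hfuel' : (m - (a + 1)).toNat ≤ f := by omega
      rw [PySem.List.pyRange_one_cons halt]
      cases k with
      | zero =>
        rw [PySem.List.combinations_cons_succ, PySem.List.combinations_zero,
            PySem.List.combinations_zero, PySem.List.combinations_one]
        simp only [List.flatMap_cons, List.flatMap_nil, List.append_nil, List.getLastD_nil,
          List.nil_append]
        rw [show a - 1 + 1 = a by ring, PySem.List.pyRange_one_cons halt]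
        simp
      | succ k' =>
        rw [PySem.List.combinations_cons_succ, PySem.List.combinations_cons_succ,
            List.flatMap_append]
        congr 1
        · -- combinations with a prepended
          rw [List.flatMap_map]
          have hcongr : ∀ c ∈ PySem.List.combinations (PySem.List.pyRange (a+1) m 1) k',
              (PySem.List.pyRange ((a :: c).getLastD (a - 1) + 1) m 1).map (fun i => a :: c ++ [i])
                = ((PySem.List.pyRange (c.getLastD (a + 1 - 1) + 1) m 1).map (fun i => c ++ [i])).map (fun c => a :: c) := by
            intro c _
            simp only [List.getLastD_cons, List.map_map]
            rw [show a + 1 - 1 = a by ring]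
            rfl
          rw [List.flatMap_congr hcongr]
          rw [← List.map_flatMap, ← ihf m (a+1) hfuel' k']
        · -- combinations without a
          have hcongr : ∀ c ∈ PySem.List.combinations (PySem.List.pyRange (a+1) m 1) (k'+1),
              (PySem.List.pyRange (c.getLastD (a - 1) + 1) m 1).map (fun i => c ++ [i])
                = (PySem.List.pyRange (c.getLastD (a + 1 - 1) + 1) m 1).map (fun i => c ++ [i]) := by
            intro c hc
            have hne : c ≠ [] := by
              intro h
              have := PySem.List.length_of_mem_combinations hc
              simp [h] at this
            cases c with
            | nil => exact absurd rfl hne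
            | cons y t =>
              rw [List.getLastD_eq_getLast?, List.getLastD_eq_getLast?,
                  List.getLast?_eq_some_getLast (l := y :: t) (by simp)]
              rfl
          rw [List.flatMap_congr hcongr, ← ihf m (a+1) hfuel' (k'+1)]

lemma pv_layer_eq (m : Int) (k : Nat) :
    pvLayer m k = PySem.List.combinations (PySem.List.pyRange 0 m 1) k := by
  induction k with
  | zero => simp [pvLayer, PySem.List.combinations_zero]
  | succ k ih =>
    rw [show pvLayer m (k+1) = (pvLayer m k).flatMap
      (fun c => (PySem.List.pyRange (c.getLastD (-1) + 1) m 1).map (fun i => c ++ [i])) from rfl]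
    rw [ih, pv_comb_aux ((m - 0).toNat) m 0 le_rfl k]
    norm_num

lemma pv_layer_mem (m : Int) (k : Nat) (c : List Int) (hc : c ∈ pvLayer m k) :
    c.Nodup ∧ c.Pairwise (· < ·) ∧ c.length = k ∧ ∀ x ∈ c, 0 ≤ x ∧ x < m := by
  rw [pv_layer_eq, PySem.List.mem_combinations_iff] at hc
  obtain ⟨hsub, hlen⟩ := hc
  refine ⟨hsub.nodup (PySem.List.nodup_pyRange_one 0 m), (PySem.List.pairwise_lt_pyRange_one 0 m).sublist hsub, hlen, ?_⟩
  intro x hx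
  have := hsub.subset hx
  rw [PySem.List.mem_pyRange_one] at this
  exact this

-- ---- B's loop ----

lemma pv_inner_fold (l : List Int) (f : Int → List Char × Int) (g : Int → String)
    (st : List (List Char × Int) × PySem.Set String) :
    l.foldl (fun st3 i => (st3.1 ++ [f i], PySem.Set.add st3.2 (g i))) st
      = (st.1 ++ l.map f, (l.map g).foldl PySem.Set.add st.2) := by
  induction l generalizing st with
  | nil => simp
  | cons x t ih => simp [ih]

lemma pv_mid_fold (l : List (List Char × Int)) (F : List Char × Int → List (List Char × Int))
    (G : List Char × Int → List String) (st : List (List Char × Int) × PySem.Set String) :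
    l.foldl (fun st2 sj => (st2.1 ++ F sj, (G sj).foldl PySem.Set.add st2.2)) st
      = (st.1 ++ l.flatMap F, (l.flatMap G).foldl PySem.Set.add st.2) := by
  induction l generalizing st with
  | nil => simp
  | cons x t ih => simp [ih, List.foldl_append]

-- the one-layer step of B's loop

lemma pv_B_step (lp dm : List Char) (k : Nat) (V : PySem.Set String) :
    (pvFr lp ((lp.length : Int) - 1) k).foldl
      (fun st2 sj =>
        (PySem.List.pyRange (sj.2 + 1) ((lp.length : Int) - 1) 1).foldl
          (fun st3 i =>
            let p := i + 1 + (k : Int)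
            let t := PySem.List.slice sj.1 none (some p) ++ '.' :: PySem.List.slice sj.1 (some p) none
            (st3.1 ++ [(t, i)], PySem.Set.add st3.2 (String.ofList (t ++ '@' :: dm))))
          st2)
      (([] : List (List Char × Int)), V) =
      (pvFr lp ((lp.length : Int) - 1) (k + 1),
       (pvEmit lp dm ((lp.length : Int) - 1) k).foldl PySem.Set.add V) := by
  set m : Int := (lp.length : Int) - 1 with hm
  have hinner : ∀ (st2 : List (List Char × Int) × PySem.Set String) (sj : List Char × Int),
      (PySem.List.pyRange (sj.2 + 1) m 1).foldl
        (fun st3 i =>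
          let p := i + 1 + (k : Int)
          let t := PySem.List.slice sj.1 none (some p) ++ '.' :: PySem.List.slice sj.1 (some p) none
          (st3.1 ++ [(t, i)], PySem.Set.add st3.2 (String.ofList (t ++ '@' :: dm))))
        st2
      = (st2.1 ++ (PySem.List.pyRange (sj.2 + 1) m 1).map
            (fun i => (PySem.List.slice sj.1 none (some (i + 1 + (k:Int))) ++ '.' :: PySem.List.slice sj.1 (some (i + 1 + (k:Int))) none, i)),
         ((PySem.List.pyRange (sj.2 + 1) m 1).map
            (fun i => String.ofList ((PySem.List.slice sj.1 none (some (i + 1 + (k:Int))) ++ '.' :: PySem.List.slice sj.1 (some (i + 1 + (k:Int))) none) ++ '@' :: dm))).foldl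
           PySem.Set.add st2.2) := by
    intro st2 sj
    exact pv_inner_fold _ _ _ st2
  rw [show (fun (st2 : List (List Char × Int) × PySem.Set String) (sj : List Char × Int) =>
        (PySem.List.pyRange (sj.2 + 1) m 1).foldl
          (fun st3 i =>
            let p := i + 1 + (k : Int)
            let t := PySem.List.slice sj.1 none (some p) ++ '.' :: PySem.List.slice sj.1 (some p) none
            (st3.1 ++ [(t, i)], PySem.Set.add st3.2 (String.ofList (t ++ '@' :: dm))))
          st2) = _ from funext fun st2 => funext fun sj => hinner st2 sj]
  rw [pv_mid_fold]
  have hcore : ∀ c ∈ pvLayer m k, ∀ i ∈ PySem.List.pyRange (c.getLastD (-1) + 1) m 1,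
      PySem.List.slice (pvDot lp 0 c) none (some (i + 1 + (k:Int))) ++
          '.' :: PySem.List.slice (pvDot lp 0 c) (some (i + 1 + (k:Int))) none
        = pvDot lp 0 (c ++ [i]) := by
    intro c hc i hi
    obtain ⟨hn, hpair, hlen, hbnd⟩ := pv_layer_mem m k c hc
    rw [PySem.List.mem_pyRange_one] at hi
    have hi0 : 0 ≤ i := by
      cases c with
      | nil => simpa using hi.1
      | cons y t =>
        have hmem : (y :: t).getLastD (-1) ∈ y :: t := by
          rw [List.getLastD_eq_getLast?]
          simp [List.getLast?_eq_some_getLast]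
        have := (hbnd _ hmem).1
        omega
    have hbi : ∀ x ∈ c, 0 ≤ x ∧ x < i := by
      intro x hx
      exact ⟨(hbnd x hx).1, lt_of_le_of_lt (pv_last_le c hpair x hx (-1)) (by omega)⟩
    have hp0 : (0:Int) ≤ i + 1 + (k:Int) := by omega
    rw [PySem.List.slice_to _ hp0, PySem.List.slice_from _ hp0]
    rw [pvDot_insert lp c i hn hbi hi0 (by omega), hlen]
  refine Prod.ext ?_ ?_
  · dsimp only
    rw [List.nil_append]
    unfold pvFr
    rw [List.flatMap_map]
    rw [show pvLayer m (k+1) = (pvLayer m k).flatMap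
      (fun c => (PySem.List.pyRange (c.getLastD (-1) + 1) m 1).map (fun i => c ++ [i])) from rfl]
    rw [List.map_flatMap]
    apply List.flatMap_congr
    intro c hc
    rw [List.map_map]
    apply List.map_congr_left
    intro i hi
    simp only [Function.comp_apply]
    rw [hcore c hc i hi, List.getLastD_concat]
  · dsimp only
    congr 1
    unfold pvFr pvEmit
    rw [List.flatMap_map]
    rw [show pvLayer m (k+1) = (pvLayer m k).flatMap
      (fun c => (PySem.List.pyRange (c.getLastD (-1) + 1) m 1).map (fun i => c ++ [i])) from rfl]
    rw [List.map_flatMap]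
    apply List.flatMap_congr
    intro c hc
    rw [List.map_map]
    apply List.map_congr_left
    intro i hi
    simp only [Function.comp_apply]
    rw [← hcore c hc i hi]

lemma pv_B_loop (lp dm : List Char) (K : Nat) :
    (PySem.List.pyRange 0 (K : Int) 1).foldl
      (fun (st : List (List Char × Int) × PySem.Set String) k =>
        st.1.foldl
          (fun st2 sj =>
            (PySem.List.pyRange (sj.2 + 1) ((lp.length : Int) - 1) 1).foldl
              (fun st3 i =>
                let p := i + 1 + k
                let t := PySem.List.slice sj.1 none (some p) ++ '.' :: PySem.List.slice sj.1 (some p) none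
                (st3.1 ++ [(t, i)], PySem.Set.add st3.2 (String.ofList (t ++ '@' :: dm))))
              st2)
          (([] : List (List Char × Int)), st.2))
      ([(lp, (-1 : Int))], (PySem.Set.empty : PySem.Set String)) =
      (pvFr lp ((lp.length : Int) - 1) K,
       ((List.range K).flatMap (fun k => pvEmit lp dm ((lp.length : Int) - 1) k)).foldl
         PySem.Set.add PySem.Set.empty) := by
  induction K with
  | zero =>
    rw [Nat.cast_zero, PySem.List.pyRange_one_eq_nil le_rfl]
    simp only [List.foldl_nil, List.range_zero, List.flatMap_nil]
    unfold pvFr pvLayer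
    simp [pvDot_outside lp 0 [] (by simp)]
  | succ K ih =>
    rw [show ((K + 1 : Nat) : Int) = (K : Int) + 1 by push_cast; ring,
        PySem.List.pyRange_one_succ_right (by positivity), List.foldl_append, ih]
    rw [List.foldl_cons, List.foldl_nil]
    have := pv_B_step lp dm K (((List.range K).flatMap
        (fun k => pvEmit lp dm ((lp.length : Int) - 1) k)).foldl PySem.Set.add PySem.Set.empty)
    rw [this]
    rw [List.range_succ, List.flatMap_append, List.foldl_append]
    simp

-- ---- assembly ----

lemma pv_main (lp dm : List Char) :
    (PySem.List.pyRange 1 ((lp.length : Int)) 1).foldl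
      (fun variations i =>
        (PySem.List.combinations (PySem.List.pyRange 0 ((lp.length : Int) - 1) 1) i.toNat).foldl
          (fun variations combination =>
            PySem.Set.add variations (pvRenderA lp dm combination))
          variations)
      (PySem.Set.empty : PySem.Set String) =
      ((List.range (((lp.length : Int) - 1).toNat)).flatMap
        (fun k => pvEmit lp dm ((lp.length : Int) - 1) k)).foldl PySem.Set.add PySem.Set.empty := by
  set m : Int := (lp.length : Int) - 1 with hm
  -- inner fold over combinations = fold of Set.add over the mapped list
  have hinner : ∀ (v : PySem.Set String) (i : Int),
      (PySem.List.combinations (PySem.List.pyRange 0 ((lp.length : Int) - 1) 1) i.toNat).foldl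
        (fun v c => PySem.Set.add v (pvRenderA lp dm c)) v
      = ((PySem.List.combinations (PySem.List.pyRange 0 m 1) i.toNat).map (pvRenderA lp dm)).foldl
          PySem.Set.add v := by
    intro v i
    rw [List.foldl_map]
  rw [show (fun (variations : PySem.Set String) (i : Int) =>
        (PySem.List.combinations (PySem.List.pyRange 0 ((lp.length : Int) - 1) 1) i.toNat).foldl
          (fun variations combination => PySem.Set.add variations (pvRenderA lp dm combination))
          variations) = _ from funext fun v => funext fun i => hinner v i]
  rw [← List.foldl_flatMap]
  congr 1
  -- both flatMaps run over List.range ((lp.length - 1).toNat)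
  rw [PySem.List.pyRange_one 1 (lp.length : Int)]
  rw [List.flatMap_map]
  apply List.flatMap_congr
  intro j hj
  have hto : ((1 : Int) + (j : Int)).toNat = j + 1 := by omega
  rw [hto, pvEmit, pv_layer_eq]
  apply List.map_congr_left
  intro c hc
  rw [PySem.List.mem_combinations_iff] at hc
  obtain ⟨hsub, hlenc⟩ := hc
  apply pv_renderA_eq lp dm c (hsub.nodup (PySem.List.nodup_pyRange_one 0 m))
  intro x hx
  have := hsub.subset hx
  rw [PySem.List.mem_pyRange_one] at this
  constructor
  · exact this.1
  · omega

-- ===== VERDICT (by name: the statement is the Claim_ definition above) =====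
theorem generate_email_variations_spec : Claim_equal_generate_email_variations := by
  intro email _hdom hpre
  unfold Spec_generate_email_variations
  unfold Pre_generate_email_variations at hpre
  obtain ⟨lp, dm, hsplit⟩ := List.length_eq_two.1 hpre
  unfold generate_email_variations generate_email_variations_alt
  rw [hsplit]
  rw [if_pos (by simp : ([lp, dm] : List (List Char)).length = 2)]
  simp only [List.headD_cons, List.tail_cons]
  by_cases hlp : lp = []
  · subst hlp
    have h0 : PySem.List.len ([] : List Char) = 0 := by simp [PySem.List.len_eq]
    rw [h0]
    rw [PySem.List.pyRange_one_eq_nil (by omega : (0:Int) ≤ 1),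
        PySem.List.pyRange_one_eq_nil (by omega : (0:Int) - 1 ≤ 0)]
    rfl
  · have hlen : PySem.List.len lp = (lp.length : Int) := PySem.List.len_eq lp
    have hpos : 1 ≤ lp.length := by
      cases lp with
      | nil => exact absurd rfl hlp
      | cons a t => simp
    rw [hlen]
    have hBL := pv_B_loop lp dm (lp.length - 1)
    have hc : (((lp.length - 1 : Nat)) : Int) = (lp.length : Int) - 1 := by omega
    rw [hc] at hBL
    rw [hBL]
    rw [pv_main lp dm]
    have hc2 : ((lp.length : Int) - 1).toNat = lp.length - 1 := by omega
    rw [hc2]
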